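-- pv_equiv track=rewrite | github.com/Mkarthiga/Computational-Intelligence | wumpusgame.py | moveAgent
-- ===== SOURCE A (Python) =====
-- def moveAgent(x,y,env,world):
--     safePlace="O"
--     visited="V"
--     wumpus="W"
--     flag=1
--     for i in range(len(env)):
--         for j in range(len(env[i])):
--             if(safePlace in env[i][j] and visited not in env[i][j] ):
--                 if((i==x+1 and j==y)or(i==x and j==y+1)or(i==x-1 and j==y)or(i==x and j==y-1)):
--                     return i,j
--     for i in range(len(env)):
--         for j in range(len(env[i])):
--            if(safePlace in env[i][j]):
--               if((i==x+1 and j==y)or(i==x and j==y+1)or(i==x-1 and j==y)or(i==x and j==y-1)):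
--                    return i,j
-- ===== SOURCE B (Python) =====
-- def moveAgent(x, y, env, world):
--     # Only the 4 neighbours of (x,y) can be returned; probe them directly,
--     # in row-major order (the order A's full-grid scan discovers them).
--     def cell(i, j):
--         if 0 <= i < len(env) and 0 <= j < len(env[i]):
--             return env[i][j]
--         return None
--     for need_unvisited in (True, False):
--         for (i, j) in ((x - 1, y), (x, y - 1), (x, y + 1), (x + 1, y)):
--             c = cell(i, j)
--             if c is not None and "O" in c and not (need_unvisited and "V" in c):
--                 return (i, j)
--     return None
-- ===== Notes on version B (the rewrite author's own statement) =====
-- stated objective: faster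
-- what changed: Instead of scanning the whole grid twice in row-major order testing every cell for adjacency, B probes only the 4 neighbour coordinates of (x,y) directly (in row-major order, unvisited-safe pass first, then safe pass), with bounds guards.
import Mathlib
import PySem

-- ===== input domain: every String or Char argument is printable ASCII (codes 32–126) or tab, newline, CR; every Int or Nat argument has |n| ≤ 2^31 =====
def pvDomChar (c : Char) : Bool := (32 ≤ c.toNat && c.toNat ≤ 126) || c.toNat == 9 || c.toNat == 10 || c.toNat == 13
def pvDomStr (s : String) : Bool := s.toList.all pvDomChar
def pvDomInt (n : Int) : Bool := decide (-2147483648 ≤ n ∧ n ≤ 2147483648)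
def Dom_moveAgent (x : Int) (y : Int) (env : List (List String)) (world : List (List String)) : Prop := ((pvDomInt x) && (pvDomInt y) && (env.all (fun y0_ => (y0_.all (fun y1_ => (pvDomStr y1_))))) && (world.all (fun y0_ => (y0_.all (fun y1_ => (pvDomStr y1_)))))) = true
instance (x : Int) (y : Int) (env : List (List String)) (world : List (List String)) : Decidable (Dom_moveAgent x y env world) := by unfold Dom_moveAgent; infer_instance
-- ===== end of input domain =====

-- B probes only the 4 neighbour coordinates of (x,y) instead of scanning the whole grid twice (faster).


-- ===== PORT A =====
-- adjacency test, exactly A's compound condition in its order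
def adjA (x y i j : Int) : Bool :=
  (i == x + 1 && j == y) || (i == x && j == y + 1) || (i == x - 1 && j == y) || (i == x && j == y - 1)

-- inner 'for j in range(len(env[i]))' loop (j is the running column counter);
-- pred is the cell condition of the pass ('O in c and V not in c' / 'O in c')
def innerScanA (pred : String → Bool) (x y i : Int) (j : Int) (row : List String) : Option (Int × Int) :=
  match row with
  | [] => none
  | c :: rest =>
    if pred c then
      if adjA x y i j then some (i, j) else innerScanA pred x y i (j + 1) rest
    else innerScanA pred x y i (j + 1) rest

-- outer 'for i in range(len(env))' loop (i is the running row counter); used once per pass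
def outerScanA (pred : String → Bool) (x y : Int) (i : Int) (rows : List (List String)) : Option (Int × Int) :=
  match rows with
  | [] => none
  | row :: rest =>
    match innerScanA pred x y i 0 row with
    | some r => some r
    | none => outerScanA pred x y (i + 1) rest

def condPass1 (c : String) : Bool := PySem.Str.isIn "O" c && !(PySem.Str.isIn "V" c)
def condPass2 (c : String) : Bool := PySem.Str.isIn "O" c

def moveAgent (x : Int) (y : Int) (env : List (List String)) (world : List (List String)) : Option (Int × Int) :=
  match outerScanA condPass1 x y 0 env with
  | some r => some r
  | none => outerScanA condPass2 x y 0 env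

-- ===== PORT B =====
-- B's local helper cell(i, j): bounds-guarded lookup
def cellB (env : List (List String)) (i j : Int) : Option String :=
  if 0 ≤ i ∧ i < (env.length : Int) ∧ 0 ≤ j then
    match PySem.List.pyGet? env i with
    | some row => if j < (row.length : Int) then PySem.List.pyGet? row j else none
    | none => none
  else none

-- body of B's inner loop at one neighbour coordinate
def tryB (env : List (List String)) (needUnvisited : Bool) (p : Int × Int) : Option (Int × Int) :=
  match cellB env p.1 p.2 with
  | some c =>
    if PySem.Str.isIn "O" c && !(needUnvisited && PySem.Str.isIn "V" c) then some p else none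
  | none => none

def moveAgent_alt (x : Int) (y : Int) (env : List (List String)) (world : List (List String)) : Option (Int × Int) :=
  -- 'for need_unvisited in (True, False)' unrolled; inner loop over the 4 neighbours
  match [(x - 1, y), (x, y - 1), (x, y + 1), (x + 1, y)].findSome? (tryB env true) with
  | some r => some r
  | none => [(x - 1, y), (x, y - 1), (x, y + 1), (x + 1, y)].findSome? (tryB env false)

-- ===== PRECONDITION & SPEC =====
def Spec_moveAgent (x : Int) (y : Int) (env : List (List String)) (world : List (List String)) (out : Option (Int × Int)) : Prop := out = moveAgent_alt x y env world
instance (x : Int) (y : Int) (env : List (List String)) (world : List (List String)) (out : Option (Int × Int)) : Decidable (Spec_moveAgent x y env world out) := by unfold Spec_moveAgent; infer_instance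

-- ===== CLAIM (what is proved, stated in full; the proofs are below) =====
def Claim_equal_moveAgent : Prop := ∀ (x : Int) (y : Int) (env : List (List String)) (world : List (List String)), Dom_moveAgent x y env world → Spec_moveAgent x y env world (moveAgent x y env world)

-- ===== LEMMAS AND PROOFS =====

-- first-hit of A's inner scan over a row, as a per-coordinate probe (proof-side spec)
def probeRow (pred : String → Bool) (i : Int) (j : Int) (row : List String) (p : Int × Int) : Option (Int × Int) :=
  match row with
  | [] => none
  | c :: rest =>
    if p.1 = i ∧ p.2 = j then (if pred c then some p else none)
    else probeRow pred i (j + 1) rest p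

-- per-coordinate probe for the whole grid suffix starting at row index i (proof-side spec)
def probeGrid (pred : String → Bool) (i : Int) (rows : List (List String)) (p : Int × Int) : Option (Int × Int) :=
  match rows with
  | [] => none
  | row :: rest =>
    if p.1 = i then probeRow pred i 0 row p else probeGrid pred (i + 1) rest p

-- 4-neighbour chain, the common shape of both sides
def chain4 (x y : Int) (f : Int × Int → Option (Int × Int)) : Option (Int × Int) :=
  match f (x - 1, y) with
  | some r => some r
  | none =>
    match f (x, y - 1) with
    | some r => some r
    | none =>
      match f (x, y + 1) with
      | some r => some r
      | none => f (x + 1, y)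

theorem probeRow_cons_eq (pred : String → Bool) (i j : Int) (c : String) (rest : List String) (r s : Int) :
    probeRow pred i j (c :: rest) (r, s) =
      if r = i ∧ s = j then (if pred c then some (r, s) else none)
      else probeRow pred i (j + 1) rest (r, s) := rfl

theorem probeGrid_cons_eq (pred : String → Bool) (i : Int) (row : List String) (rest : List (List String)) (r s : Int) :
    probeGrid pred i (row :: rest) (r, s) =
      if r = i then probeRow pred i 0 row (r, s) else probeGrid pred (i + 1) rest (r, s) := rfl

theorem probeRow_ne (pred : String → Bool) (i j r s : Int) (row : List String)
    (h : r ≠ i) : probeRow pred i j row (r, s) = none := by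
  induction row generalizing j with
  | nil => rfl
  | cons c rest ih => simp [probeRow, h, ih]

theorem probeRow_lt (pred : String → Bool) (i j r s : Int) (row : List String)
    (h : s < j) : probeRow pred i j row (r, s) = none := by
  induction row generalizing j with
  | nil => rfl
  | cons c rest ih =>
    have hn : ¬ (r = i ∧ s = j) := by omega
    simp [probeRow, hn, ih (j + 1) (by omega)]

theorem probeGrid_lt (pred : String → Bool) (i r s : Int) (rows : List (List String))
    (h : r < i) : probeGrid pred i rows (r, s) = none := by
  induction rows generalizing i with
  | nil => rfl
  | cons row rest ih =>
    have hn : ¬ (r = i) := by omega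
    simp [probeGrid, hn, ih (i + 1) (by omega)]

-- one cons step of the 4-chain of row probes = A's inner loop body
theorem chain4_probeRow_cons (pred : String → Bool) (x y i j : Int) (c : String) (rest : List String) :
    chain4 x y (probeRow pred i j (c :: rest)) =
      if pred c && adjA x y i j then some (i, j)
      else chain4 x y (probeRow pred i (j + 1) rest) := by
  by_cases h1 : i = x - 1 ∧ j = y
  · have adj : adjA x y i j = true := by simp [adjA]; omega
    have e1 : probeRow pred i j (c :: rest) (x - 1, y) =
        if pred c then some (x - 1, y) else none := by
      rw [probeRow_cons_eq, if_pos (by omega)]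
    have n2 : probeRow pred i j (c :: rest) (x, y - 1) = none := probeRow_ne _ _ _ _ _ _ (by omega)
    have n3 : probeRow pred i j (c :: rest) (x, y + 1) = none := probeRow_ne _ _ _ _ _ _ (by omega)
    have n4 : probeRow pred i j (c :: rest) (x + 1, y) = none := probeRow_ne _ _ _ _ _ _ (by omega)
    have n1' : probeRow pred i (j + 1) rest (x - 1, y) = none := probeRow_lt _ _ _ _ _ _ (by omega)
    have n2' : probeRow pred i (j + 1) rest (x, y - 1) = none := probeRow_ne _ _ _ _ _ _ (by omega)
    have n3' : probeRow pred i (j + 1) rest (x, y + 1) = none := probeRow_ne _ _ _ _ _ _ (by omega)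
    have n4' : probeRow pred i (j + 1) rest (x + 1, y) = none := probeRow_ne _ _ _ _ _ _ (by omega)
    simp only [chain4, e1, n2, n3, n4, n1', n2', n3', n4', adj, Bool.and_true]
    cases hp : pred c <;> simp [Prod.ext_iff] <;> omega
  · by_cases h2 : i = x ∧ j = y - 1
    · have adj : adjA x y i j = true := by simp [adjA]; omega
      have n1 : probeRow pred i j (c :: rest) (x - 1, y) = none := probeRow_ne _ _ _ _ _ _ (by omega)
      have e2 : probeRow pred i j (c :: rest) (x, y - 1) =
          if pred c then some (x, y - 1) else none := by
        rw [probeRow_cons_eq, if_pos (by omega)]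
      have e3 : probeRow pred i j (c :: rest) (x, y + 1) =
          probeRow pred i (j + 1) rest (x, y + 1) := by
        rw [probeRow_cons_eq, if_neg (by omega)]
      have n4 : probeRow pred i j (c :: rest) (x + 1, y) = none := probeRow_ne _ _ _ _ _ _ (by omega)
      have n1' : probeRow pred i (j + 1) rest (x - 1, y) = none := probeRow_ne _ _ _ _ _ _ (by omega)
      have n2' : probeRow pred i (j + 1) rest (x, y - 1) = none := probeRow_lt _ _ _ _ _ _ (by omega)
      have n4' : probeRow pred i (j + 1) rest (x + 1, y) = none := probeRow_ne _ _ _ _ _ _ (by omega)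
      simp only [chain4, e2, e3, n1, n4, n1', n2', n4', adj, Bool.and_true]
      cases hp : pred c <;>
        cases hr : probeRow pred i (j + 1) rest (x, y + 1) <;>
          simp [Prod.ext_iff] <;> omega
    · by_cases h3 : i = x ∧ j = y + 1
      · have adj : adjA x y i j = true := by simp [adjA]; omega
        have n1 : probeRow pred i j (c :: rest) (x - 1, y) = none := probeRow_ne _ _ _ _ _ _ (by omega)
        have n2 : probeRow pred i j (c :: rest) (x, y - 1) = none := by
          rw [probeRow_cons_eq, if_neg (by omega)]
          exact probeRow_lt _ _ _ _ _ _ (by omega)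
        have e3 : probeRow pred i j (c :: rest) (x, y + 1) =
            if pred c then some (x, y + 1) else none := by
          rw [probeRow_cons_eq, if_pos (by omega)]
        have n4 : probeRow pred i j (c :: rest) (x + 1, y) = none := probeRow_ne _ _ _ _ _ _ (by omega)
        have n1' : probeRow pred i (j + 1) rest (x - 1, y) = none := probeRow_ne _ _ _ _ _ _ (by omega)
        have n2' : probeRow pred i (j + 1) rest (x, y - 1) = none := probeRow_lt _ _ _ _ _ _ (by omega)
        have n3' : probeRow pred i (j + 1) rest (x, y + 1) = none := probeRow_lt _ _ _ _ _ _ (by omega)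
        have n4' : probeRow pred i (j + 1) rest (x + 1, y) = none := probeRow_ne _ _ _ _ _ _ (by omega)
        simp only [chain4, e3, n1, n2, n4, n1', n2', n3', n4', adj, Bool.and_true]
        cases hp : pred c <;> simp [Prod.ext_iff] <;> omega
      · by_cases h4 : i = x + 1 ∧ j = y
        · have adj : adjA x y i j = true := by simp [adjA]; omega
          have n1 : probeRow pred i j (c :: rest) (x - 1, y) = none := probeRow_ne _ _ _ _ _ _ (by omega)
          have n2 : probeRow pred i j (c :: rest) (x, y - 1) = none := probeRow_ne _ _ _ _ _ _ (by omega)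
          have n3 : probeRow pred i j (c :: rest) (x, y + 1) = none := probeRow_ne _ _ _ _ _ _ (by omega)
          have e4 : probeRow pred i j (c :: rest) (x + 1, y) =
              if pred c then some (x + 1, y) else none := by
            rw [probeRow_cons_eq, if_pos (by omega)]
          have n1' : probeRow pred i (j + 1) rest (x - 1, y) = none := probeRow_ne _ _ _ _ _ _ (by omega)
          have n2' : probeRow pred i (j + 1) rest (x, y - 1) = none := probeRow_ne _ _ _ _ _ _ (by omega)
          have n3' : probeRow pred i (j + 1) rest (x, y + 1) = none := probeRow_ne _ _ _ _ _ _ (by omega)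
          have n4' : probeRow pred i (j + 1) rest (x + 1, y) = none := probeRow_lt _ _ _ _ _ _ (by omega)
          simp only [chain4, e4, n1, n2, n3, n1', n2', n3', n4', adj, Bool.and_true]
          cases hp : pred c <;> simp [Prod.ext_iff] <;> omega
        · -- (i, j) is none of the 4 neighbours: the cons cell can never be returned
          have adj : adjA x y i j = false := by simp [adjA]; omega
          have q1 : ¬ ((x - 1 : Int) = i ∧ y = j) := by omega
          have q2 : ¬ ((x : Int) = i ∧ y - 1 = j) := by omega
          have q3 : ¬ ((x : Int) = i ∧ y + 1 = j) := by omega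
          have q4 : ¬ ((x + 1 : Int) = i ∧ y = j) := by omega
          simp [chain4, probeRow_cons_eq, q1, q2, q3, q4, adj]

-- A's inner loop = the 4-neighbour chain of row probes
theorem innerScanA_eq_chain4 (pred : String → Bool) (x y i j : Int) (row : List String) :
    innerScanA pred x y i j row = chain4 x y (probeRow pred i j row) := by
  induction row generalizing j with
  | nil => rfl
  | cons c rest ih =>
    rw [chain4_probeRow_cons, ← ih (j + 1)]
    show (if pred c then (if adjA x y i j then some (i, j) else innerScanA pred x y i (j + 1) rest)
          else innerScanA pred x y i (j + 1) rest) = _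
    cases hp : pred c <;> cases ha : adjA x y i j <;> simp [hp, ha]

-- one cons step of the 4-chain of grid probes = A's outer loop body
theorem chain4_probeGrid_cons (pred : String → Bool) (x y i : Int) (row : List String) (rest : List (List String)) :
    chain4 x y (probeGrid pred i (row :: rest)) =
      match chain4 x y (probeRow pred i 0 row) with
      | some r => some r
      | none => chain4 x y (probeGrid pred (i + 1) rest) := by
  by_cases h1 : i = x - 1
  · have t1 : ((x - 1 : Int) = i) ↔ True := iff_true_intro (by omega)
    have t2 : ((x : Int) = i) ↔ False := iff_false_intro (by omega)
    have t4 : ((x + 1 : Int) = i) ↔ False := iff_false_intro (by omega)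
    have n2 : probeRow pred i 0 row (x, y - 1) = none := probeRow_ne _ _ _ _ _ _ (by omega)
    have n3 : probeRow pred i 0 row (x, y + 1) = none := probeRow_ne _ _ _ _ _ _ (by omega)
    have n4 : probeRow pred i 0 row (x + 1, y) = none := probeRow_ne _ _ _ _ _ _ (by omega)
    have g1 : probeGrid pred (i + 1) rest (x - 1, y) = none := probeGrid_lt _ _ _ _ _ (by omega)
    simp only [chain4, probeGrid_cons_eq, t1, t2, t4, if_true, if_false, n2, n3, n4, g1]
    cases hr : probeRow pred i 0 row (x - 1, y) <;> simp
  · by_cases h2 : i = x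
    · have t1 : ((x - 1 : Int) = i) ↔ False := iff_false_intro (by omega)
      have t2 : ((x : Int) = i) ↔ True := iff_true_intro (by omega)
      have t4 : ((x + 1 : Int) = i) ↔ False := iff_false_intro (by omega)
      have n1 : probeRow pred i 0 row (x - 1, y) = none := probeRow_ne _ _ _ _ _ _ (by omega)
      have n4 : probeRow pred i 0 row (x + 1, y) = none := probeRow_ne _ _ _ _ _ _ (by omega)
      have g1 : probeGrid pred (i + 1) rest (x - 1, y) = none := probeGrid_lt _ _ _ _ _ (by omega)
      have g2 : probeGrid pred (i + 1) rest (x, y - 1) = none := probeGrid_lt _ _ _ _ _ (by omega)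
      have g3 : probeGrid pred (i + 1) rest (x, y + 1) = none := probeGrid_lt _ _ _ _ _ (by omega)
      simp only [chain4, probeGrid_cons_eq, t1, t2, t4, if_true, if_false, n1, n4, g1, g2, g3]
      cases hr2 : probeRow pred i 0 row (x, y - 1) <;>
        cases hr3 : probeRow pred i 0 row (x, y + 1) <;> simp
    · by_cases h3 : i = x + 1
      · have t1 : ((x - 1 : Int) = i) ↔ False := iff_false_intro (by omega)
        have t2 : ((x : Int) = i) ↔ False := iff_false_intro (by omega)
        have t4 : ((x + 1 : Int) = i) ↔ True := iff_true_intro (by omega)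
        have n1 : probeRow pred i 0 row (x - 1, y) = none := probeRow_ne _ _ _ _ _ _ (by omega)
        have n2 : probeRow pred i 0 row (x, y - 1) = none := probeRow_ne _ _ _ _ _ _ (by omega)
        have n3 : probeRow pred i 0 row (x, y + 1) = none := probeRow_ne _ _ _ _ _ _ (by omega)
        have g1 : probeGrid pred (i + 1) rest (x - 1, y) = none := probeGrid_lt _ _ _ _ _ (by omega)
        have g2 : probeGrid pred (i + 1) rest (x, y - 1) = none := probeGrid_lt _ _ _ _ _ (by omega)
        have g3 : probeGrid pred (i + 1) rest (x, y + 1) = none := probeGrid_lt _ _ _ _ _ (by omega)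
        have g4 : probeGrid pred (i + 1) rest (x + 1, y) = none := probeGrid_lt _ _ _ _ _ (by omega)
        simp only [chain4, probeGrid_cons_eq, t1, t2, t4, if_true, if_false, n1, n2, n3, g1, g2, g3, g4]
        cases hr : probeRow pred i 0 row (x + 1, y) <;> simp
      · have t1 : ((x - 1 : Int) = i) ↔ False := iff_false_intro (by omega)
        have t2 : ((x : Int) = i) ↔ False := iff_false_intro (by omega)
        have t4 : ((x + 1 : Int) = i) ↔ False := iff_false_intro (by omega)
        have n1 : probeRow pred i 0 row (x - 1, y) = none := probeRow_ne _ _ _ _ _ _ (by omega)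
        have n2 : probeRow pred i 0 row (x, y - 1) = none := probeRow_ne _ _ _ _ _ _ (by omega)
        have n3 : probeRow pred i 0 row (x, y + 1) = none := probeRow_ne _ _ _ _ _ _ (by omega)
        have n4 : probeRow pred i 0 row (x + 1, y) = none := probeRow_ne _ _ _ _ _ _ (by omega)
        simp only [chain4, probeGrid_cons_eq, t1, t2, t4, if_false, n1, n2, n3, n4]

-- A's double loop = the 4-neighbour chain of grid probes
theorem outerScanA_eq_chain4 (pred : String → Bool) (x y i : Int) (rows : List (List String)) :
    outerScanA pred x y i rows = chain4 x y (probeGrid pred i rows) := by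
  induction rows generalizing i with
  | nil => rfl
  | cons row rest ih =>
    rw [chain4_probeGrid_cons, ← ih (i + 1), ← innerScanA_eq_chain4]
    rfl

-- closed form of a row probe (indexed lookup)
theorem probeRow_lookup (pred : String → Bool) (i : Int) (row : List String) (r s : Int) (j : Int) :
    probeRow pred i j row (r, s) =
      if r = i ∧ j ≤ s ∧ s - j < (row.length : Int) then
        (if pred (row.getD (s - j).toNat "") then some (r, s) else none)
      else none := by
  induction row generalizing j with
  | nil =>
    have hf : ¬ (r = i ∧ j ≤ s ∧ s - j < (([] : List String).length : Int)) := by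
      simp
    rw [if_neg hf]; rfl
  | cons c rest ih =>
    have hlen : ((c :: rest).length : Int) = (rest.length : Int) + 1 := by simp
    by_cases h : r = i ∧ s = j
    · obtain ⟨h1, h2⟩ := h
      have hcond : r = i ∧ j ≤ s ∧ s - j < ((c :: rest).length : Int) := ⟨h1, by omega, by omega⟩
      rw [probeRow_cons_eq, if_pos ⟨h1, h2⟩, if_pos hcond]
      have h0 : (s - j).toNat = 0 := by omega
      simp [h0]
    · rw [probeRow_cons_eq, if_neg h, ih (j + 1)]
      by_cases hc : r = i ∧ j + 1 ≤ s ∧ s - (j + 1) < (rest.length : Int)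
      · obtain ⟨h1, h2, h3⟩ := hc
        have hb : r = i ∧ j ≤ s ∧ s - j < ((c :: rest).length : Int) := ⟨h1, by omega, by omega⟩
        rw [if_pos ⟨h1, h2, h3⟩, if_pos hb]
        have hk : (s - j).toNat = (s - (j + 1)).toNat + 1 := by omega
        simp [hk]
      · rw [if_neg hc, if_neg (show ¬ (r = i ∧ j ≤ s ∧ s - j < ((c :: rest).length : Int)) from by omega)]

-- closed form of a grid probe
theorem probeGrid_lookup (pred : String → Bool) (i : Int) (rows : List (List String)) (r s : Int) :
    probeGrid pred i rows (r, s) =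
      if i ≤ r ∧ r - i < (rows.length : Int) then
        probeRow pred r 0 (rows.getD (r - i).toNat []) (r, s)
      else none := by
  induction rows generalizing i with
  | nil =>
    have hf : ¬ (i ≤ r ∧ r - i < (([] : List (List String)).length : Int)) := by
      simp
    rw [if_neg hf]; rfl
  | cons row rest ih =>
    have hlen : ((row :: rest).length : Int) = (rest.length : Int) + 1 := by simp
    by_cases h : r = i
    · have hcond : i ≤ r ∧ r - i < ((row :: rest).length : Int) := ⟨by omega, by omega⟩
      rw [probeGrid_cons_eq, if_pos h, if_pos hcond]
      have h0 : (r - i).toNat = 0 := by omega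
      simp [h0, h]
    · rw [probeGrid_cons_eq, if_neg h, ih (i + 1)]
      by_cases hc : i + 1 ≤ r ∧ r - (i + 1) < (rest.length : Int)
      · have hb : i ≤ r ∧ r - i < ((row :: rest).length : Int) := ⟨by omega, by omega⟩
        rw [if_pos hc, if_pos hb]
        have hk : (r - i).toNat = (r - (i + 1)).toNat + 1 := by omega
        simp [hk]
      · rw [if_neg hc, if_neg (show ¬ (i ≤ r ∧ r - i < ((row :: rest).length : Int)) from by omega)]

-- closed form of B's bounds-guarded lookup
theorem cellB_eq (env : List (List String)) (r s : Int) :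
    cellB env r s =
      if 0 ≤ r ∧ r < (env.length : Int) ∧ 0 ≤ s ∧ s < ((env.getD r.toNat []).length : Int) then
        some ((env.getD r.toNat []).getD s.toNat "")
      else none := by
  unfold cellB
  by_cases hg : 0 ≤ r ∧ r < (env.length : Int) ∧ 0 ≤ s
  · obtain ⟨ha, hb, hcc⟩ := hg
    have hlt : r.toNat < env.length := by omega
    have hrow : PySem.List.pyGet? env r = some (env.getD r.toNat []) := by
      conv_lhs => rw [show r = ((r.toNat : Nat) : Int) from by omega]
      rw [PySem.List.pyGet?_natCast, List.getElem?_eq_getElem hlt, List.getD_eq_getElem _ _ hlt]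
    rw [if_pos ⟨ha, hb, hcc⟩, hrow]
    by_cases h2 : s < ((env.getD r.toNat []).length : Int)
    · have hslt : s.toNat < (env.getD r.toNat []).length := by omega
      have hcell : PySem.List.pyGet? (env.getD r.toNat []) s =
          some ((env.getD r.toNat []).getD s.toNat "") := by
        conv_lhs => rw [show s = ((s.toNat : Nat) : Int) from by omega]
        rw [PySem.List.pyGet?_natCast, List.getElem?_eq_getElem hslt, List.getD_eq_getElem _ _ hslt]
      simp only [if_pos h2, hcell]
      rw [if_pos ⟨ha, hb, hcc, h2⟩]
    · simp only [if_neg h2]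
      rw [if_neg (show ¬ (0 ≤ r ∧ r < (env.length : Int) ∧ 0 ≤ s ∧ s < ((env.getD r.toNat []).length : Int)) from by
        intro hcon; exact h2 hcon.2.2.2)]
  · rw [if_neg hg, if_neg (fun hcon => hg ⟨hcon.1, hcon.2.1, hcon.2.2.1⟩)]

-- B's probe at one coordinate = the grid probe from row 0
theorem tryB_eq_probeGrid (env : List (List String)) (b : Bool) (r s : Int) :
    tryB env b (r, s) =
      probeGrid (fun c => PySem.Str.isIn "O" c && !(b && PySem.Str.isIn "V" c)) 0 env (r, s) := by
  rw [probeGrid_lookup, probeRow_lookup]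
  unfold tryB
  rw [cellB_eq]
  simp only [sub_zero]
  by_cases hg : 0 ≤ r ∧ r < (env.length : Int)
  · by_cases hs : 0 ≤ s ∧ s < ((env.getD r.toNat []).length : Int)
    · rw [if_pos ⟨hg.1, hg.2, hs.1, hs.2⟩, if_pos hg,
        if_pos (show True ∧ 0 ≤ s ∧ s < ((env.getD r.toNat []).length : Int) from ⟨trivial, hs.1, hs.2⟩)]
    · rw [if_neg (fun hcon => hs ⟨hcon.2.2.1, hcon.2.2.2⟩), if_pos hg,
        if_neg (show ¬ (True ∧ 0 ≤ s ∧ s < ((env.getD r.toNat []).length : Int)) from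
          fun hcon => hs ⟨hcon.2.1, hcon.2.2⟩)]
  · rw [if_neg (fun hcon => hg ⟨hcon.1, hcon.2.1⟩), if_neg hg]

-- B's findSome? over the literal neighbour list is the same 4-chain
theorem findSome_eq_chain4 (x y : Int) (f : Int × Int → Option (Int × Int)) :
    [(x - 1, y), (x, y - 1), (x, y + 1), (x + 1, y)].findSome? f = chain4 x y f := by
  simp only [List.findSome?, chain4]
  cases f (x - 1, y) <;> cases f (x, y - 1) <;> cases f (x, y + 1) <;> cases f (x + 1, y) <;> rfl

theorem moveAgent_eq_alt (x y : Int) (env world : List (List String)) :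
    moveAgent x y env world = moveAgent_alt x y env world := by
  have hc1 : (fun c => PySem.Str.isIn "O" c && !(true && PySem.Str.isIn "V" c)) = condPass1 := by
    funext c; simp [condPass1]
  have hc2 : (fun c => PySem.Str.isIn "O" c && !(false && PySem.Str.isIn "V" c)) = condPass2 := by
    funext c; simp [condPass2]
  have e1 : ∀ r s : Int, tryB env true (r, s) = probeGrid condPass1 0 env (r, s) := by
    intro r s; rw [tryB_eq_probeGrid, hc1]
  have e2 : ∀ r s : Int, tryB env false (r, s) = probeGrid condPass2 0 env (r, s) := by
    intro r s; rw [tryB_eq_probeGrid, hc2]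
  unfold moveAgent moveAgent_alt
  rw [outerScanA_eq_chain4, outerScanA_eq_chain4, findSome_eq_chain4, findSome_eq_chain4]
  simp only [chain4, e1, e2]

-- ===== VERDICT (by name: the statement is the Claim_ definition above) =====
theorem moveAgent_spec : Claim_equal_moveAgent := by
  intro x y env world _
  unfold Spec_moveAgent
  exact moveAgent_eq_alt x y env world
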